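-- pv_equiv track=rewrite | github.com/ahmedfahad04/IIT-LAB | 4th Semester Labs/CSE 411_ Information Security/AES_class.py | text_to_matrix_conversin
-- ===== SOURCE A (Python) =====
-- def text_to_matrix_conversin(data):
--
--     input_matrix = [[]]
--     matrix = []
--
--     letter = 0
--     initial_value = 0
--     temp = 0
--     for i in range(0, len(data), 16):   # for each block of 16 bytes
--         for row in range(0, 4, 1):
--             cell = []
--             inital_value = i    # helps to create the 2nd list of the matrix
--             temp = i            # helps to insert element coloumn wise
--
--             for col in range(0, 4, 1):
--
--                 if i < len(data):
--                     cell.append(hex(ord(data[i])))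
--                 else:
--                     cell.append(hex(ord('#')))
--                 i += 4
--
--             matrix.append(cell)
--             temp += 1
--             i = temp
--
--         input_matrix.append(matrix)
--         matrix = []
--
--         i = inital_value
--
--     return input_matrix
-- ===== SOURCE B (Python) =====
-- def text_to_matrix_conversin(data):
--     s = data + '#' * (-len(data) % 16)
--     out = [[]]
--     for k in range(0, len(s), 16):
--         groups = [s[j:j + 4] for j in range(k, k + 16, 4)]
--         out.append([[hex(ord(c)) for c in col] for col in zip(*groups)])
--     return out
-- ===== Notes on version B (the rewrite author's own statement) =====
-- stated objective: simpler
-- what changed: A's three nested loops with mutated/reset index variables (temp/inital_value juggling) are replaced by padding the text with the pad character to a multiple of 16, slicing each 16-char block into four 4-char column groups and transposing them with zip(*groups).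
import Mathlib
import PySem

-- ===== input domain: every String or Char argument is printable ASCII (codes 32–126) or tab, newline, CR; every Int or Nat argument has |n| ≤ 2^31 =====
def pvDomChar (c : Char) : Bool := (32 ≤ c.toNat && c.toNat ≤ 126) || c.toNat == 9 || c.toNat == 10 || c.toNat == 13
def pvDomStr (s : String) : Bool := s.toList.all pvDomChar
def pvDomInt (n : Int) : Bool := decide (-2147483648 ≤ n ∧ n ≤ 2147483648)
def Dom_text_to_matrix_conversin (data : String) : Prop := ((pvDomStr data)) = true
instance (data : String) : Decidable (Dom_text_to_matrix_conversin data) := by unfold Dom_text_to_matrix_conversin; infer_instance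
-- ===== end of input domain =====

-- B replaces A's triple nested loop with its index juggling by: pad to a multiple of 16 with
-- '#', slice each 16-char block into four 4-char column groups, transpose them (objective: simpler).

-- ===== PORT A =====
-- both ports share pvHexOrd, the port of Python's hex(ord(c)) (exact for character codes < 256,
-- which covers the stated domain)
def pvHexDigit (n : Nat) : Char := if n < 10 then Char.ofNat (48 + n) else Char.ofNat (87 + n)

def pvHexOrd (c : Char) : String :=
  let n := c.toNat
  if n < 16 then String.ofList ['0', 'x', pvHexDigit n]
  else String.ofList ['0', 'x', pvHexDigit (n / 16), pvHexDigit (n % 16)]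

-- A's 'for col' loop, state (cell, i); the guard 'i < len(data)' makes data[i] safe, so the
-- pyGet?-result is always 'some' and .getD '#' is never the default
def pvCellA (l : List Char) (i : Int) : List String × Int :=
  (PySem.List.pyRange 0 4 1).foldl
    (fun (ci : List String × Int) _col =>
      (ci.1 ++ [if ci.2 < (l.length : Int)
                 then pvHexOrd ((PySem.List.pyGet? l ci.2).getD '#')
                 else pvHexOrd '#'],
       ci.2 + 4))
    ([], i)

-- A's 'for row' loop, state (i, matrix): 'temp = i; …cols…; matrix.append(cell); temp += 1; i = temp'
def pvRowsA (l : List Char) (i0 : Int) : Int × List (List String) :=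
  (PySem.List.pyRange 0 4 1).foldl
    (fun (st : Int × List (List String)) _row =>
      (st.1 + 1, st.2 ++ [(pvCellA l st.1).1]))
    (i0, [])

-- A's outer loop; the trailing 'i = inital_value' is dead state (range reassigns i), so only
-- input_matrix is carried
def text_to_matrix_conversin (data : String) : List (List (List String)) :=
  let l := data.toList
  (PySem.List.pyRange 0 (l.length : Int) 16).foldl
    (fun input_matrix i0 => input_matrix ++ [(pvRowsA l i0).2])
    [[]]

-- ===== PORT B =====
-- one block of Source B: four 4-char column slices, transposed with zip(*groups)
-- (zip of four equal-length groups ported index-wise: row r = the r-th element of each group;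
-- every group has length 4, so the .getD default '#' is never taken)
def pvBlockB (s : List Char) (k : Int) : List (List String) :=
  let groups := (PySem.List.pyRange k (k + 16) 4).map
    (fun j => PySem.List.slice s (some j) (some (j + 4)))
  (List.range 4).map (fun r => groups.map (fun g => pvHexOrd (g.getD r '#')))

def text_to_matrix_conversin_alt (data : String) : List (List (List String)) :=
  let s := data.toList ++ List.replicate (PySem.Int.mod (-(data.toList.length : Int)) 16).toNat '#'
  (PySem.List.pyRange 0 (s.length : Int) 16).foldl
    (fun out k => out ++ [pvBlockB s k])
    [[]]

-- ===== PRECONDITION & SPEC =====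
def Spec_text_to_matrix_conversin (data : String) (out : List (List (List String))) : Prop := out = text_to_matrix_conversin_alt data
instance (data : String) (out : List (List (List String))) : Decidable (Spec_text_to_matrix_conversin data out) := by unfold Spec_text_to_matrix_conversin; infer_instance

-- ===== CLAIM (what is proved, stated in full; the proofs are below) =====
def Claim_equal_text_to_matrix_conversin : Prop := ∀ (data : String), Dom_text_to_matrix_conversin data → Spec_text_to_matrix_conversin data (text_to_matrix_conversin data)

-- ===== LEMMAS AND PROOFS =====

-- the common value of one matrix entry at (nonnegative) index x: hex(ord(.)) of the x-th char
def pvEntI (l : List Char) (x : Int) : String := pvHexOrd ((PySem.List.pyGet? l x).getD '#')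

lemma pvEntA (l : List Char) (x : Int) (hx : 0 ≤ x) :
    (if x < (l.length : Int) then pvHexOrd ((PySem.List.pyGet? l x).getD '#') else pvHexOrd '#')
      = pvEntI l x := by
  unfold pvEntI
  split_ifs with h
  · rfl
  · obtain ⟨j, rfl⟩ : ∃ j : Nat, x = (j : Int) := ⟨x.toNat, by omega⟩
    rw [PySem.List.pyGet?_natCast,
        List.getElem?_eq_none_iff.mpr (show l.length ≤ j by exact_mod_cast by omega)]
    rfl

lemma pvCellA_eq (l : List Char) (x : Int) (hx : 0 ≤ x) :
    pvCellA l x = ([pvEntI l x, pvEntI l (x + 4), pvEntI l (x + 8), pvEntI l (x + 12)], x + 16) := by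
  have h4 : PySem.List.pyRange 0 4 1 = [0, 1, 2, 3] := by decide
  simp only [pvCellA, h4, List.foldl_cons, List.foldl_nil]
  rw [show x + 4 + 4 + 4 + 4 = x + 16 by ring, show x + 4 + 4 + 4 = x + 12 by ring,
      show x + 4 + 4 = x + 8 by ring,
      pvEntA l x hx, pvEntA l (x + 4) (by omega), pvEntA l (x + 8) (by omega),
      pvEntA l (x + 12) (by omega)]
  simp

lemma pvRowsA_eq (l : List Char) (x : Int) (hx : 0 ≤ x) :
    (pvRowsA l x).2 =
      [[pvEntI l x, pvEntI l (x + 4), pvEntI l (x + 8), pvEntI l (x + 12)],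
       [pvEntI l (x + 1), pvEntI l (x + 5), pvEntI l (x + 9), pvEntI l (x + 13)],
       [pvEntI l (x + 2), pvEntI l (x + 6), pvEntI l (x + 10), pvEntI l (x + 14)],
       [pvEntI l (x + 3), pvEntI l (x + 7), pvEntI l (x + 11), pvEntI l (x + 15)]] := by
  have h4 : PySem.List.pyRange 0 4 1 = [0, 1, 2, 3] := by decide
  simp only [pvRowsA, h4, List.foldl_cons, List.foldl_nil]
  rw [show x + 1 + 1 + 1 = x + 3 by ring, show x + 1 + 1 = x + 2 by ring,
      pvCellA_eq l x hx, pvCellA_eq l (x + 1) (by omega), pvCellA_eq l (x + 2) (by omega),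
      pvCellA_eq l (x + 3) (by omega)]
  norm_num
  ring_nf
  tauto

lemma pvSliceEnt (s : List Char) (x : Int) (hx : 0 ≤ x) (r : Nat) (hr : r < 4) :
    pvHexOrd ((PySem.List.slice s (some x) (some (x + 4))).getD r '#') = pvEntI s (x + r) := by
  obtain ⟨j, rfl⟩ : ∃ j : Nat, x = (j : Int) := ⟨x.toNat, by omega⟩
  rw [show (j : Int) + 4 = ((j + 4 : Nat) : Int) by push_cast; ring,
      PySem.List.slice_natCast,
      show (j : Int) + (r : Int) = ((j + r : Nat) : Int) by push_cast; ring]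
  unfold pvEntI
  rw [PySem.List.pyGet?_natCast]
  simp only [List.getD_eq_getElem?_getD, List.getElem?_take, List.getElem?_drop]
  rw [if_pos (by omega)]

lemma pvEntI_pad (l : List Char) (p : Nat) (x : Int) (hx : 0 ≤ x) :
    pvEntI (l ++ List.replicate p '#') x = pvEntI l x := by
  obtain ⟨j, rfl⟩ : ∃ j : Nat, x = (j : Int) := ⟨x.toNat, by omega⟩
  unfold pvEntI
  rw [PySem.List.pyGet?_natCast, PySem.List.pyGet?_natCast]
  by_cases h : j < l.length
  · rw [List.getElem?_append_left h]
  · rw [List.getElem?_eq_none_iff.mpr (show l.length ≤ j by omega)]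
    by_cases h2 : j < l.length + p
    · rw [List.getElem?_eq_getElem (show j < (l ++ List.replicate p '#').length by simp; omega)]
      rw [List.getElem_append_right (show l.length ≤ j by omega)]
      simp
    · rw [List.getElem?_eq_none_iff.mpr (show (l ++ List.replicate p '#').length ≤ j by simp; omega)]

lemma pvBlockB_eq (l : List Char) (p : Nat) (x : Int) (hx : 0 ≤ x) :
    pvBlockB (l ++ List.replicate p '#') x =
      [[pvEntI l x, pvEntI l (x + 4), pvEntI l (x + 8), pvEntI l (x + 12)],
       [pvEntI l (x + 1), pvEntI l (x + 5), pvEntI l (x + 9), pvEntI l (x + 13)],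
       [pvEntI l (x + 2), pvEntI l (x + 6), pvEntI l (x + 10), pvEntI l (x + 14)],
       [pvEntI l (x + 3), pvEntI l (x + 7), pvEntI l (x + 11), pvEntI l (x + 15)]] := by
  have hr : PySem.List.pyRange x (x + 16) 4 = [x, x + 4, x + 8, x + 12] := by
    rw [PySem.List.pyRange_of_pos _ _ (by norm_num), if_pos (by omega)]
    rw [show ((x + 16 - x + 4 - 1) / 4 : Int).toNat = 4 by
      rw [show (x + 16 - x + 4 - 1 : Int) = 19 by ring]; decide]
    norm_num [List.range_succ]
  simp only [pvBlockB, hr, List.range_succ, List.range_zero, List.map_cons, List.map_nil,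
    List.nil_append, List.cons_append]
  rw [pvSliceEnt _ x hx 0 (by omega),
      pvSliceEnt _ x hx 1 (by omega),
      pvSliceEnt _ x hx 2 (by omega),
      pvSliceEnt _ x hx 3 (by omega),
      pvSliceEnt _ (x + 4) (by omega) 0 (by omega),
      pvSliceEnt _ (x + 4) (by omega) 1 (by omega),
      pvSliceEnt _ (x + 4) (by omega) 2 (by omega),
      pvSliceEnt _ (x + 4) (by omega) 3 (by omega),
      pvSliceEnt _ (x + 8) (by omega) 0 (by omega),
      pvSliceEnt _ (x + 8) (by omega) 1 (by omega),
      pvSliceEnt _ (x + 8) (by omega) 2 (by omega),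
      pvSliceEnt _ (x + 8) (by omega) 3 (by omega),
      pvSliceEnt _ (x + 12) (by omega) 0 (by omega),
      pvSliceEnt _ (x + 12) (by omega) 1 (by omega),
      pvSliceEnt _ (x + 12) (by omega) 2 (by omega),
      pvSliceEnt _ (x + 12) (by omega) 3 (by omega)]
  norm_num
  ring_nf
  refine ⟨⟨?_, ?_, ?_, ?_⟩, ⟨?_, ?_, ?_, ?_⟩, ⟨?_, ?_, ?_, ?_⟩, ?_, ?_, ?_, ?_⟩ <;>
    exact pvEntI_pad l p _ (by omega)

-- padding to a multiple of 16 does not change the list of block starts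
lemma pvRange_eq (n : Nat) :
    PySem.List.pyRange 0 (n : Int) 16 =
      PySem.List.pyRange 0 ((n + (PySem.Int.mod (-(n : Int)) 16).toNat : Nat) : Int) 16 := by
  by_cases hn : n = 0
  · subst hn
    norm_num
  · have hmn := PySem.Int.mod_nonneg (-(n : Int)) (b := 16) (by norm_num)
    have hml := PySem.Int.mod_lt (-(n : Int)) (b := 16) (by norm_num)
    have hfd := PySem.Int.floordiv_mul_add_mod (-(n : Int)) 16
    rw [PySem.List.pyRange_of_pos _ _ (by norm_num), PySem.List.pyRange_of_pos _ _ (by norm_num),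
        if_pos (by push_cast; omega), if_pos (by push_cast; omega)]
    rw [show (((n : Int) - 0 + 16 - 1) / 16).toNat
          = ((((n + (PySem.Int.mod (-(n : Int)) 16).toNat : Nat) : Int) - 0 + 16 - 1) / 16).toNat by
        push_cast; omega]

lemma pvMain (l : List Char) :
    (PySem.List.pyRange 0 (l.length : Int) 16).foldl
        (fun input_matrix i0 => input_matrix ++ [(pvRowsA l i0).2]) [[]]
      = (PySem.List.pyRange 0
            (((l ++ List.replicate (PySem.Int.mod (-(l.length : Int)) 16).toNat '#').length : Nat) : Int) 16).foldl
          (fun out k => out ++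
            [pvBlockB (l ++ List.replicate (PySem.Int.mod (-(l.length : Int)) 16).toNat '#') k]) [[]] := by
  rw [PySem.List.foldl_append_singleton_eq_map, PySem.List.foldl_append_singleton_eq_map]
  rw [show ((l ++ List.replicate (PySem.Int.mod (-(l.length : Int)) 16).toNat '#').length : Nat)
        = l.length + (PySem.Int.mod (-(l.length : Int)) 16).toNat by simp]
  rw [← pvRange_eq l.length]
  congr 1
  apply List.map_congr_left
  intro x hx
  rw [PySem.List.mem_pyRange_iff_of_pos (by norm_num)] at hx
  obtain ⟨hx0, -, -⟩ := hx
  rw [pvRowsA_eq _ _ hx0, pvBlockB_eq _ _ _ hx0]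

-- ===== VERDICT (by name: the statement is the Claim_ definition above) =====
theorem text_to_matrix_conversin_spec : Claim_equal_text_to_matrix_conversin := by
  intro data _
  show text_to_matrix_conversin data = text_to_matrix_conversin_alt data
  exact pvMain data.toList
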